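-- pv_equiv track=rewrite | github.com/Derek-Xiang/Fixed-Width-File-Parser | converter/specLoader.py | readRow
-- ===== SOURCE A (Python) =====
-- def readRow(row, colNames, offsets):
--     rowDict = {}
--     start = 0
--     end = 0
--     for index in range(len(colNames)):
--         end += int(offsets[index])
--         # fill the rowDict its header corresponding with its content
--         rowDict[colNames[index]] = row[start:end]
--         start += int(offsets[index])
--     return rowDict
-- ===== SOURCE B (Python) =====
-- def readRow(row, colNames, offsets):
--     # Phase 1: cumulative boundary table over the first len(colNames) offsets.
--     bounds = [0]
--     for i in range(len(colNames)):
--         bounds.append(bounds[-1] + int(offsets[i]))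
--     # Phase 2: name -> slice, edges read off the boundary table.
--     return {name: row[lo:hi] for name, lo, hi in zip(colNames, bounds, bounds[1:])}
-- ===== Notes on version B (the rewrite author's own statement) =====
-- stated objective: idiomatic
-- what changed: Replaces the single loop threading start/end counters with two phases: a cumulative boundary table built first, then a dict comprehension zipping names with adjacent boundary pairs.
import Mathlib
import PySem

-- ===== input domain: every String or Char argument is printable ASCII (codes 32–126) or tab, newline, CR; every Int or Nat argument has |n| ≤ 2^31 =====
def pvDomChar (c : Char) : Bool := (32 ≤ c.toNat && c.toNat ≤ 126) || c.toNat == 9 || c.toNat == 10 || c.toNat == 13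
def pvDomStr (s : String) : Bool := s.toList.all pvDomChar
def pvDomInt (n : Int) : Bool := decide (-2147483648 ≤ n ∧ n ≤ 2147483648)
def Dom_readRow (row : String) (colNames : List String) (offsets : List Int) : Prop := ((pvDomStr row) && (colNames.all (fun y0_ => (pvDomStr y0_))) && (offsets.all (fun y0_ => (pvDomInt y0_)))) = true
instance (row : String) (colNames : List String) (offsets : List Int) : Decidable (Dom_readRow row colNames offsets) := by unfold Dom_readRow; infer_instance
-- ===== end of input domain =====

-- B replaces A's single loop threading start/end counters with two phases — a cumulative
-- boundary table, then a name/edge zip — same cost; proved equal whenever A returns.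


-- ===== PORT A =====
def readRow (row : String) (colNames : List String) (offsets : List Int) : List (String × String) :=
  -- rowDict = {}; start = 0; end = 0; for index in range(len(colNames)): …
  let final := (PySem.List.pyRange 0 (PySem.List.len colNames) 1).foldl
    (fun (st : PySem.Dict String String × Int × Int) index =>
      let e := st.2.2 + PySem.List.pyGetD offsets index 0
      let d := st.1.insert (PySem.List.pyGetD colNames index "")
                 (PySem.Str.slice row (some st.2.1) (some e))
      let s := st.2.1 + PySem.List.pyGetD offsets index 0
      (d, s, e))
    (PySem.Dict.empty, 0, 0)
  final.1.items

-- ===== PORT B =====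
def readRow_alt (row : String) (colNames : List String) (offsets : List Int) : List (String × String) :=
  -- bounds = [0]; for i in range(len(colNames)): bounds.append(bounds[-1] + int(offsets[i]))
  let bounds : List Int := (PySem.List.pyRange 0 (PySem.List.len colNames) 1).foldl
    (fun bs i => bs ++ [PySem.List.pyGetD bs (-1) 0 + PySem.List.pyGetD offsets i 0]) [0]
  -- {name: row[lo:hi] for name, lo, hi in zip(colNames, bounds, bounds[1:])}
  let triples := colNames.zip (bounds.zip (PySem.List.slice bounds (some 1) none))
  (triples.foldl
    (fun d t => d.insert t.1 (PySem.Str.slice row (some t.2.1) (some t.2.2)))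
    PySem.Dict.empty).items

-- ===== PRECONDITION & SPEC =====
-- Pre_ excludes exactly the inputs where A raises IndexError: fewer offsets than column names.
def Pre_readRow (row : String) (colNames : List String) (offsets : List Int) : Prop :=
  colNames.length ≤ offsets.length
instance (row : String) (colNames : List String) (offsets : List Int) : Decidable (Pre_readRow row colNames offsets) := by unfold Pre_readRow; infer_instance
def pvWitness_readRow : String × List String × List Int := ("abcdef", ["a", "b"], [2, 3])
def Spec_readRow (row : String) (colNames : List String) (offsets : List Int) (out : List (String × String)) : Prop := out = readRow_alt row colNames offsets
instance (row : String) (colNames : List String) (offsets : List Int) (out : List (String × String)) : Decidable (Spec_readRow row colNames offsets out) := by unfold Spec_readRow; infer_instance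

-- ===== CLAIM (what is proved, stated in full; the proofs are below) =====
def Claim_equal_readRow : Prop := ∀ (row : String) (colNames : List String) (offsets : List Int), Dom_readRow row colNames offsets → Pre_readRow row colNames offsets → Spec_readRow row colNames offsets (readRow row colNames offsets)

-- ===== LEMMAS AND PROOFS =====

-- the common meaning of both loops: walk (name, width) pairs with a running offset
def pvCanon (row : String) : List (String × Int) → Int → PySem.Dict String String → PySem.Dict String String
  | [], _, d => d
  | p :: ps, s, d =>
      pvCanon row ps (s + p.2) (d.insert p.1 (PySem.Str.slice row (some s) (some (s + p.2))))

-- A's loop over (name, width) pairs computes pvCanon (start and end stay equal across iterations)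
lemma pvFoldA (row : String) (ps : List (String × Int)) :
    ∀ (d : PySem.Dict String String) (s : Int),
      (ps.foldl (fun st p =>
          (st.1.insert p.1 (PySem.Str.slice row (some st.2.1) (some (st.2.2 + p.2))),
           st.2.1 + p.2, st.2.2 + p.2)) (d, s, s)).1
        = pvCanon row ps s d := by
  induction ps with
  | nil => intro d s; simp [pvCanon]
  | cons p ps ih => intro d s; simpa [pvCanon] using ih _ (s + p.2)

def pvPrefixes : List Int → Int → List Int
  | [], _ => []
  | o :: os, s => (s + o) :: pvPrefixes os (s + o)

-- B's boundary loop appends the running prefix sums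
lemma pvBoundsFold (os : List Int) :
    ∀ (pre : List Int) (x : Int),
      os.foldl (fun bs o => bs ++ [PySem.List.pyGetD bs (-1) 0 + o]) (pre ++ [x])
        = (pre ++ [x]) ++ pvPrefixes os x := by
  induction os with
  | nil => intro pre x; simp [pvPrefixes]
  | cons o os ih =>
      intro pre x
      simp only [List.foldl_cons, PySem.List.pyGetD_neg_one_append_singleton, pvPrefixes]
      have := ih (pre ++ [x]) (x + o)
      simpa using this

-- B's zip-and-insert pass over the boundary table computes pvCanon too
lemma pvFoldB (row : String) (cs : List String) :
    ∀ (os : List Int) (s : Int) (d : PySem.Dict String String),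
      ((cs.zip ((s :: pvPrefixes os s).zip (pvPrefixes os s))).foldl
          (fun d t => d.insert t.1 (PySem.Str.slice row (some t.2.1) (some t.2.2))) d)
        = pvCanon row (cs.zip os) s d := by
  induction cs with
  | nil => intro os s d; simp [pvCanon]
  | cons c cs ih =>
      intro os s d
      cases os with
      | nil => simp [pvPrefixes, pvCanon]
      | cons o os => simpa [pvPrefixes, pvCanon] using ih os (s + o) _

lemma pvZipTake {α β : Type} (cs : List α) : ∀ (os : List β), cs.zip (os.take cs.length) = cs.zip os := by
  induction cs with
  | nil => intro os; simp
  | cons c cs ih => intro os; cases os <;> simp [ih]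

lemma pvA_eq_canon (row : String) (colNames : List String) (offsets : List Int)
    (h : colNames.length ≤ offsets.length) :
    readRow row colNames offsets = (pvCanon row (colNames.zip offsets) 0 PySem.Dict.empty).items := by
  unfold readRow
  have hlen : (colNames.zip offsets).length = colNames.length := by
    simp [List.length_zip]; omega
  simp only [PySem.List.len_eq]
  rw [show (colNames.length : Int) = ((colNames.zip offsets).length : Int) by rw [hlen]]
  rw [PySem.List.foldl_congr_mem _ _
      ( fun (st : PySem.Dict String String × Int × Int) j =>
        (st.1.insert (PySem.List.pyGetD (colNames.zip offsets) j ("", 0)).1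
           (PySem.Str.slice row (some st.2.1)
             (some (st.2.2 + (PySem.List.pyGetD (colNames.zip offsets) j ("", 0)).2))),
         st.2.1 + (PySem.List.pyGetD (colNames.zip offsets) j ("", 0)).2,
         st.2.2 + (PySem.List.pyGetD (colNames.zip offsets) j ("", 0)).2))
      _ (by
        intro acc j hj
        rw [PySem.List.mem_pyRange_one] at hj
        have hjc : j.toNat < colNames.length := by omega
        have hjo : j.toNat < offsets.length := by omega
        have h1 : PySem.List.pyGetD (colNames.zip offsets) j ("", 0)
            = (PySem.List.pyGetD colNames j "", PySem.List.pyGetD offsets j 0) := by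
          rw [PySem.List.pyGetD_eq_getElem (colNames.zip offsets) ("", 0) hj.1
                (by exact_mod_cast hj.2),
              PySem.List.pyGetD_eq_getElem colNames "" hj.1 (by omega),
              PySem.List.pyGetD_eq_getElem offsets 0 hj.1 (by omega),
              List.getElem_zip]
        simp only [h1])]
  rw [PySem.List.foldl_pyRange_zero_pyGetD' (colNames.zip offsets) ("", 0)
      (fun (st : PySem.Dict String String × Int × Int) p =>
        (st.1.insert p.1 (PySem.Str.slice row (some st.2.1) (some (st.2.2 + p.2))),
         st.2.1 + p.2, st.2.2 + p.2))
      (PySem.Dict.empty, 0, 0)]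
  rw [pvFoldA row (colNames.zip offsets) PySem.Dict.empty 0]

lemma pvB_eq_canon (row : String) (colNames : List String) (offsets : List Int)
    (h : colNames.length ≤ offsets.length) :
    readRow_alt row colNames offsets = (pvCanon row (colNames.zip offsets) 0 PySem.Dict.empty).items := by
  unfold readRow_alt
  have htake : (offsets.take colNames.length).length = colNames.length := by
    simp [List.length_take]; omega
  simp only [PySem.List.len_eq]
  have hbounds : (PySem.List.pyRange 0 (colNames.length : Int) 1).foldl
      (fun bs i => bs ++ [PySem.List.pyGetD bs (-1) 0 + PySem.List.pyGetD offsets i 0]) [0]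
      = 0 :: pvPrefixes (offsets.take colNames.length) 0 := by
    rw [show (colNames.length : Int) = ((offsets.take colNames.length).length : Int) by rw [htake]]
    rw [PySem.List.foldl_congr_mem _ _
        ( fun (bs : List Int) j =>
          bs ++ [PySem.List.pyGetD bs (-1) 0 + PySem.List.pyGetD (offsets.take colNames.length) j 0])
        _ (by
          intro acc j hj
          rw [PySem.List.mem_pyRange_one] at hj
          have hjt : j.toNat < (offsets.take colNames.length).length := by omega
          have hjo : j.toNat < offsets.length := by
            simp [List.length_take] at hjt; omega
          have h1 : PySem.List.pyGetD (offsets.take colNames.length) j 0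
              = PySem.List.pyGetD offsets j 0 := by
            rw [PySem.List.pyGetD_eq_getElem (offsets.take colNames.length) 0 hj.1
                  (by omega),
                PySem.List.pyGetD_eq_getElem offsets 0 hj.1 (by omega),
                List.getElem_take]
          simp only [h1])]
    rw [PySem.List.foldl_pyRange_zero_pyGetD' (offsets.take colNames.length) 0
        (fun (bs : List Int) o => bs ++ [PySem.List.pyGetD bs (-1) 0 + o]) [0]]
    simpa using pvBoundsFold (offsets.take colNames.length) [] 0
  rw [hbounds, PySem.List.slice_from_one]
  show ((colNames.zip ((0 :: pvPrefixes (offsets.take colNames.length) 0).zip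
      (pvPrefixes (offsets.take colNames.length) 0))).foldl _ PySem.Dict.empty).items = _
  rw [pvFoldB row colNames (offsets.take colNames.length) 0 PySem.Dict.empty, pvZipTake]

-- ===== VERDICT (by name: the statement is the Claim_ definition above) =====
theorem readRow_spec : Claim_equal_readRow := by
  intro row colNames offsets _ hpre
  unfold Spec_readRow
  rw [pvA_eq_canon row colNames offsets hpre, pvB_eq_canon row colNames offsets hpre]
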